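-- pv_equiv track=rewrite | github.com/Ley-code/Competitive-programming | A_Download_More_RAM.py | findMaxRam
-- ===== SOURCE A (Python) =====
-- def findMaxRam(n,k,a,b):
--   ab = [(0,0)]*n
--   for i in range(n):
--     ab[i] = (a[i],b[i])
--   ab.sort()
--   for eachA,eachB in ab:
--     if eachA <= k:
--       k += eachB
--   return k
-- ===== SOURCE B (Python) =====
-- def findMaxRam(n, k, a, b):
--     # selection: repeatedly extract the lexicographically smallest remaining
--     # (requirement, gain) pair and apply it; no sort call.
--     m = max(0, n)
--     rem = list(zip(a[:m], b[:m]))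
--     while rem:
--         p = min(rem)
--         rem.remove(p)
--         if p[0] <= k:
--             k += p[1]
--     return k
-- ===== Notes on version B (the rewrite author's own statement) =====
-- stated objective: alternative
-- what changed: Replaces build-array-then-library-sort-then-scan by a selection loop that repeatedly extracts the lexicographically smallest remaining (requirement, gain) pair and applies it, never sorting.
import Mathlib
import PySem

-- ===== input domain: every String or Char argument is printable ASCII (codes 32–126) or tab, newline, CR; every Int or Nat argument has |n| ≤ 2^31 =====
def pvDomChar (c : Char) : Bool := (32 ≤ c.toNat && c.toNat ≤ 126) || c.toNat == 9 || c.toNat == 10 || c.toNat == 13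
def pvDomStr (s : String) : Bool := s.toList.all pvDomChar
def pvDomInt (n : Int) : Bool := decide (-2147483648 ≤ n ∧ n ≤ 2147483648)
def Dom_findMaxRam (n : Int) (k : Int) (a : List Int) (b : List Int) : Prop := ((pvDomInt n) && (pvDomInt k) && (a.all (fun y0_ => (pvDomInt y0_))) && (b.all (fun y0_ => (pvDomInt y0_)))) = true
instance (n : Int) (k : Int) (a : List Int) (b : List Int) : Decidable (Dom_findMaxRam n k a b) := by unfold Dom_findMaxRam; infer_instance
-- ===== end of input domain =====

-- B replaces A's build-array / library-sort / scan by a selection loop that repeatedly extracts the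
-- lexicographically smallest remaining (requirement, gain) pair and applies it; no sort call (alternative).

-- ===== PORT A =====
def findMaxRam (n : Int) (k : Int) (a : List Int) (b : List Int) : Int :=
  -- ab = [(0,0)]*n  (n < 0 gives [])
  let ab0 : List (Int × Int) := List.replicate n.toNat ((0 : Int), (0 : Int))
  -- for i in range(n): ab[i] = (a[i], b[i])   (in-range under Pre_)
  let ab := (PySem.List.pyRange 0 n 1).foldl
      (fun acc i => PySem.List.pySetD acc i (PySem.List.pyGetD a i 0, PySem.List.pyGetD b i 0)) ab0
  -- ab.sort()  (Python tuple order = lexicographic)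
  let abS := PySem.List.sorted2 ab Prod.fst Prod.snd false
  abS.foldl (fun kk p => if p.1 ≤ kk then kk + p.2 else kk) k

-- ===== PORT B =====
-- Python tuple comparison '<' on (Int, Int): lexicographic
def pvLexLt (p q : Int × Int) : Bool := p.1 < q.1 || (p.1 == q.1 && p.2 < q.2)

-- min(rem): fold keeping the first minimal element (strict '<', as Python's min)
def pvMin (x : Int × Int) (l : List (Int × Int)) : Int × Int :=
  l.foldl (fun m y => if pvLexLt y m then y else m) x

-- the while loop: extract min, remove its first occurrence (list.remove), apply the pair;
-- the Nat fuel (initially the list length, which the loop never exhausts) only makes it total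
def pvSel : Nat → List (Int × Int) → Int → Int
  | 0, _, k => k
  | _ + 1, [], k => k
  | fuel + 1, x :: rest, k =>
    let m := pvMin x rest
    pvSel fuel ((x :: rest).erase m) (if m.1 ≤ k then k + m.2 else k)

def findMaxRam_alt (n : Int) (k : Int) (a : List Int) (b : List Int) : Int :=
  let m := max 0 n
  -- rem = list(zip(a[:m], b[:m]))
  let rem := (PySem.List.slice a none (some m)).zip (PySem.List.slice b none (some m))
  pvSel rem.length rem k

-- ===== PRECONDITION & SPEC =====
-- Pre_ excludes exactly the inputs where A raises IndexError (n larger than a or b).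
def Pre_findMaxRam (n : Int) (k : Int) (a : List Int) (b : List Int) : Prop :=
  n ≤ (a.length : Int) ∧ n ≤ (b.length : Int)
instance (n : Int) (k : Int) (a : List Int) (b : List Int) : Decidable (Pre_findMaxRam n k a b) := by unfold Pre_findMaxRam; infer_instance
def pvWitness_findMaxRam : Int × Int × List Int × List Int := (2, 3, [1, 4], [5, 2])

def Spec_findMaxRam (n : Int) (k : Int) (a : List Int) (b : List Int) (out : Int) : Prop :=
  out = findMaxRam_alt n k a b
instance (n : Int) (k : Int) (a : List Int) (b : List Int) (out : Int) : Decidable (Spec_findMaxRam n k a b out) := by unfold Spec_findMaxRam; infer_instance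

-- ===== CLAIM =====
def Claim_equal_findMaxRam : Prop := ∀ (n : Int) (k : Int) (a : List Int) (b : List Int), Dom_findMaxRam n k a b → Pre_findMaxRam n k a b → Spec_findMaxRam n k a b (findMaxRam n k a b)

-- ===== LEMMAS AND PROOFS =====

lemma lexLt_iff (p q : Int × Int) : pvLexLt p q = true ↔ (p.1 < q.1 ∨ (p.1 = q.1 ∧ p.2 < q.2)) := by
  simp [pvLexLt]

lemma lexLt_irrefl (p : Int × Int) : pvLexLt p p = false := by simp [pvLexLt]

lemma lexLt_asymm_eq {p q : Int × Int} (h1 : pvLexLt p q = false) (h2 : pvLexLt q p = false) : p = q := by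
  rcases p with ⟨p1, p2⟩; rcases q with ⟨q1, q2⟩
  rw [← Bool.not_eq_true, lexLt_iff] at h1 h2
  simp only at h1 h2
  have : p1 = q1 ∧ p2 = q2 := by constructor <;> omega
  simp [this.1, this.2]

lemma lexLt_trans {p q r : Int × Int} (h1 : pvLexLt p q = true) (h2 : pvLexLt q r = true) :
    pvLexLt p r = true := by
  rw [lexLt_iff] at *; omega

lemma lexLt_cross {x y m : Int × Int} (h1 : pvLexLt y m = true) (h2 : pvLexLt y x = false) :
    pvLexLt x m = true := by
  rw [lexLt_iff] at *
  rw [← Bool.not_eq_true, lexLt_iff] at h2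
  omega

lemma lexLt_asymm {p q : Int × Int} (h : pvLexLt p q = true) : pvLexLt q p = false := by
  rw [← Bool.not_eq_true, lexLt_iff] at *; omega

lemma pvMin_mem (l : List (Int × Int)) (x : Int × Int) : pvMin x l ∈ x :: l := by
  induction l generalizing x with
  | nil => simp [pvMin]
  | cons y l ih =>
    have h := ih (if pvLexLt y x then y else x)
    simp only [pvMin, List.foldl_cons] at *
    rcases List.mem_cons.mp h with h' | h'
    · rw [h']; split <;> simp
    · simp [h']

lemma pvMin_min (l : List (Int × Int)) (x : Int × Int) :
    ∀ z ∈ x :: l, pvLexLt z (pvMin x l) = false := by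
  induction l generalizing x with
  | nil => intro z hz; simp at hz; simp [pvMin, hz, lexLt_irrefl]
  | cons y l ih =>
    have key : pvMin x (y :: l) = pvMin (if pvLexLt y x then y else x) l := by
      simp [pvMin]
    intro z hz
    rw [key]
    by_cases h : pvLexLt y x = true
    · rw [if_pos h]
      have hy : pvLexLt y (pvMin y l) = false := ih y y (by simp)
      rcases List.mem_cons.mp hz with rfl | hz'
      · by_cases hc : pvLexLt z (pvMin y l) = true
        · exact absurd (lexLt_trans h hc) (by simp [hy])
        · simpa using hc
      · exact ih y z hz'
    · have h' : pvLexLt y x = false := by simpa using h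
      rw [if_neg (by simp [h'])]
      have hx : pvLexLt x (pvMin x l) = false := ih x x (by simp)
      rcases List.mem_cons.mp hz with rfl | hz'
      · exact hx
      · rcases List.mem_cons.mp hz' with rfl | hz''
        · by_cases hc : pvLexLt z (pvMin x l) = true
          · exact absurd (lexLt_cross hc h') (by simp [hx])
          · simpa using hc
        · exact ih x z (by simp [hz''])

lemma lexLt_eq_before (p q : Int × Int) :
    pvLexLt p q = (decide (p.1 < q.1) || !decide (q.1 < p.1) && decide (p.2 < q.2)) := by
  rcases p with ⟨p1, p2⟩; rcases q with ⟨q1, q2⟩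
  simp only [pvLexLt]
  by_cases h1 : p1 < q1 <;> by_cases h2 : q1 < p1 <;> by_cases h3 : p2 < q2 <;>
    simp [h1, h2, h3] <;> omega

lemma insertBy_congr {f g : (Int × Int) → (Int × Int) → Bool} (hfg : ∀ p q, f p q = g p q)
    (x : Int × Int) (l : List (Int × Int)) :
    PySem.List.insertBy f x l = PySem.List.insertBy g x l := by
  induction l with
  | nil => rfl
  | cons y l ih => simp only [PySem.List.insertBy, hfg, ih]

lemma sorted2_eq_foldl (l : List (Int × Int)) :
    PySem.List.sorted2 l Prod.fst Prod.snd false =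
      l.foldl (fun acc x => PySem.List.insertBy pvLexLt x acc) [] := by
  unfold PySem.List.sorted2
  induction l using List.reverseRecOn with
  | nil => rfl
  | append_singleton l x ih =>
    simp only [List.foldl_append, List.foldl_cons, List.foldl_nil, ih]
    exact insertBy_congr (fun p q => (lexLt_eq_before p q).symm) x _

def pvR (p q : Int × Int) : Prop := pvLexLt q p = false

lemma pairwise_insertBy {x : Int × Int} {l : List (Int × Int)} (h : l.Pairwise pvR) :
    (PySem.List.insertBy pvLexLt x l).Pairwise pvR := by
  induction l with
  | nil => simp [PySem.List.insertBy, pvR]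
  | cons y l ih =>
    rcases List.pairwise_cons.mp h with ⟨hy, hl⟩
    by_cases hb : pvLexLt x y = true
    · rw [PySem.List.insertBy, if_pos hb]
      refine List.pairwise_cons.mpr ⟨?_, h⟩
      intro z hz
      rcases List.mem_cons.mp hz with rfl | hz'
      · exact lexLt_asymm hb
      · have hzy : pvLexLt z y = false := hy z hz'
        by_cases hc : pvLexLt z x = true
        · exact absurd (lexLt_trans hc hb) (by simp [hzy])
        · simpa [pvR] using hc
    · have hb' : pvLexLt x y = false := by simpa using hb
      rw [PySem.List.insertBy, if_neg (by simp [hb'])]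
      refine List.pairwise_cons.mpr ⟨?_, ih hl⟩
      intro z hz
      rcases (PySem.List.mem_insertBy _ _ _ _).mp hz with rfl | hz'
      · exact hb'
      · exact hy z hz'

lemma pairwise_sorted2 (l : List (Int × Int)) :
    (PySem.List.sorted2 l Prod.fst Prod.snd false).Pairwise pvR := by
  rw [sorted2_eq_foldl]
  have : ∀ acc : List (Int × Int), acc.Pairwise pvR →
      (l.foldl (fun acc x => PySem.List.insertBy pvLexLt x acc) acc).Pairwise pvR := by
    induction l with
    | nil => intro acc h; simpa
    | cons y l ih => intro acc h; exact ih _ (pairwise_insertBy h)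
  exact this [] (by simp)

lemma sorted2_min_cons (x : Int × Int) (rest : List (Int × Int)) :
    PySem.List.sorted2 (x :: rest) Prod.fst Prod.snd false =
      pvMin x rest :: PySem.List.sorted2 ((x :: rest).erase (pvMin x rest)) Prod.fst Prod.snd false := by
  set m := pvMin x rest with hm
  have hmem : m ∈ x :: rest := pvMin_mem rest x
  have hperm : (PySem.List.sorted2 (x :: rest) Prod.fst Prod.snd false).Perm
      (m :: PySem.List.sorted2 ((x :: rest).erase m) Prod.fst Prod.snd false) :=
    (PySem.List.sorted2_perm _ _ _ _).trans ((List.perm_cons_erase hmem).trans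
      (List.Perm.cons m (PySem.List.sorted2_perm _ _ _ _).symm))
  have hp1 := pairwise_sorted2 (x :: rest)
  have hp2 : (m :: PySem.List.sorted2 ((x :: rest).erase m) Prod.fst Prod.snd false).Pairwise pvR := by
    refine List.pairwise_cons.mpr ⟨?_, pairwise_sorted2 _⟩
    intro z hz
    have hz' : z ∈ (x :: rest).erase m := ((PySem.List.sorted2_perm _ _ _ _).mem_iff).mp hz
    exact pvMin_min rest x z (List.mem_of_mem_erase hz')
  exact List.Perm.eq_of_pairwise (fun a b _ _ h1 h2 => lexLt_asymm_eq h2 h1) hp1 hp2 hperm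

lemma sel_eq_fold (fuel : Nat) (l : List (Int × Int)) (k : Int) (hf : l.length ≤ fuel) :
    pvSel fuel l k =
      (PySem.List.sorted2 l Prod.fst Prod.snd false).foldl
        (fun kk p => if p.1 ≤ kk then kk + p.2 else kk) k := by
  induction fuel generalizing l k with
  | zero =>
    have : l = [] := List.eq_nil_of_length_eq_zero (Nat.le_zero.mp hf)
    subst this; rfl
  | succ fuel ih =>
    cases l with
    | nil => rfl
    | cons x rest =>
      rw [sorted2_min_cons, List.foldl_cons, pvSel]
      have hlen : ((x :: rest).erase (pvMin x rest)).length ≤ fuel := by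
        have := List.length_erase_of_mem (pvMin_mem rest x)
        simp only [List.length_cons] at *
        omega
      exact ih _ _ hlen

lemma A_build_gen (a b : List Int) (n' : Nat) (m : Nat) (hm : m ≤ n')
    (ha : n' ≤ a.length) (hb : n' ≤ b.length) :
    (PySem.List.pyRange 0 (m : Int) 1).foldl
        (fun acc i => PySem.List.pySetD acc i (PySem.List.pyGetD a i 0, PySem.List.pyGetD b i 0))
        (List.replicate n' ((0 : Int), (0 : Int))) =
      ((a.take m).zip (b.take m)) ++ List.replicate (n' - m) ((0 : Int), (0 : Int)) := by
  induction m with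
  | zero => simp [PySem.List.pyRange_one_eq_nil]
  | succ m ih =>
    have hm' : m ≤ n' := Nat.le_of_succ_le hm
    have hcast : ((m + 1 : Nat) : Int) = (m : Int) + 1 := by push_cast; ring
    rw [hcast, PySem.List.pyRange_one_succ_right (by positivity), List.foldl_append,
      ih hm', List.foldl_cons, List.foldl_nil]
    have hma : m < a.length := by omega
    have hmb : m < b.length := by omega
    have hlen : ((a.take m).zip (b.take m)).length = m := by
      simp [List.length_take]; omega
    rw [PySem.List.pySetD_natCast, List.set_append, hlen, if_neg (by omega)]
    have hrep : n' - m = (n' - (m + 1)) + 1 := by omega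
    rw [hrep, List.replicate_succ]
    simp only [Nat.sub_self, List.set_cons_zero]
    rw [List.take_add_one, List.take_add_one, List.getElem?_eq_getElem hma,
      List.getElem?_eq_getElem hmb]
    rw [List.zip_append (by simp [List.length_take]; omega)]
    simp [hma, hmb]

-- ===== VERDICT =====
theorem findMaxRam_spec : Claim_equal_findMaxRam := by
  intro n k a b _ hpre
  rcases hpre with ⟨ha, hb⟩
  unfold Spec_findMaxRam
  have hrange : PySem.List.pyRange 0 n 1 = PySem.List.pyRange 0 (n.toNat : Int) 1 := by
    rcases le_or_gt 0 n with h | h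
    · rw [Int.toNat_of_nonneg h]
    · rw [PySem.List.pyRange_one_eq_nil (by omega), PySem.List.pyRange_one_eq_nil (by omega)]
  have hA := A_build_gen a b n.toNat n.toNat le_rfl (by omega) (by omega)
  have hBa : PySem.List.slice a none (some (max 0 n)) = a.take n.toNat := by
    rw [PySem.List.slice_to a (by omega)]
    congr 1; omega
  have hBb : PySem.List.slice b none (some (max 0 n)) = b.take n.toNat := by
    rw [PySem.List.slice_to b (by omega)]
    congr 1; omega
  unfold findMaxRam findMaxRam_alt
  simp only [hrange, hA, Nat.sub_self, List.replicate_zero, List.append_nil, hBa, hBb]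
  exact (sel_eq_fold _ _ _ le_rfl).symm
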